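-- pv_equiv track=rewrite | github.com/schekoni/bahn | neuro_report/scoring.py | _score_design
-- ===== SOURCE A (Python) =====
-- def _score_design(pub_types: list[str], merged: str) -> int:
--     types = {p.lower() for p in pub_types}
--     if "randomized controlled trial" in types:
--         return 25
--     if "meta-analysis" in types or "systematic review" in types:
--         return 22
--     if "clinical trial" in types:
--         return 20
--     if "observational study" in types or "cohort" in merged:
--         return 15
--     return 8
-- ===== SOURCE B (Python) =====
-- _DESIGN_SCORES = {
--     "randomized controlled trial": 25,
--     "meta-analysis": 22,
--     "systematic review": 22,
--     "clinical trial": 20,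
--     "observational study": 15,
-- }
--
-- def _score_design(pub_types: list[str], merged: str) -> int:
--     best = 8
--     for p in pub_types:
--         best = max(best, _DESIGN_SCORES.get(p.lower(), 8))
--     if "cohort" in merged:
--         best = max(best, 15)
--     return best
-- ===== Notes on version B (the rewrite author's own statement) =====
-- stated objective: alternative
-- what changed: Replaced A's build-a-set-then-cascade-of-membership-tests by a single fold over pub_types that keeps a running max of per-tag scores looked up in a score table (plus a final max with 15 on the 'cohort' substring hit); no set is built and no condition cascade remains.
import Mathlib
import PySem

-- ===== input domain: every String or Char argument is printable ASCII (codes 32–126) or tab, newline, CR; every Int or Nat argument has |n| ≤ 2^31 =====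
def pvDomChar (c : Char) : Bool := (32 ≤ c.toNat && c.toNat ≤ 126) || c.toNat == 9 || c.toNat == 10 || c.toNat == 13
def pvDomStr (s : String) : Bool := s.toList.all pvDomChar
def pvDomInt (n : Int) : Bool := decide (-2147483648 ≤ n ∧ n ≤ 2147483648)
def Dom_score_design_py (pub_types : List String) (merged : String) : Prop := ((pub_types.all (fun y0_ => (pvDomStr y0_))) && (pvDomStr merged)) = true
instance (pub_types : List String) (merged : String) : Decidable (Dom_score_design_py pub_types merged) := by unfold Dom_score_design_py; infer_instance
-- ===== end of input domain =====

-- ===== PORT A =====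
-- B drops A's set-building and condition cascade: a single fold over pub_types keeps a running max of per-tag scores read from a table; same cost.
def score_design_py (pub_types : List String) (merged : String) : Int :=
  let types := PySem.Set.ofList (pub_types.map PySem.Str.lower)
  if PySem.Set.contains types "randomized controlled trial" then 25
  else if PySem.Set.contains types "meta-analysis" || PySem.Set.contains types "systematic review" then 22
  else if PySem.Set.contains types "clinical trial" then 20
  else if PySem.Set.contains types "observational study" || PySem.Str.isIn "cohort" merged then 15
  else 8

-- ===== PORT B =====
def pvDesignScores : PySem.Dict String Int :=
  PySem.Dict.ofList [("randomized controlled trial", 25), ("meta-analysis", 22),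
                     ("systematic review", 22), ("clinical trial", 20), ("observational study", 15)]

def score_design_py_alt (pub_types : List String) (merged : String) : Int :=
  let best : Int := 8
  let best := pub_types.foldl (fun best p => max best (PySem.Dict.getD pvDesignScores (PySem.Str.lower p) 8)) best
  let best := if PySem.Str.isIn "cohort" merged then max best 15 else best
  best

-- ===== PRECONDITION & SPEC =====
def Spec_score_design_py (pub_types : List String) (merged : String) (out : Int) : Prop := out = score_design_py_alt pub_types merged
instance (pub_types : List String) (merged : String) (out : Int) : Decidable (Spec_score_design_py pub_types merged out) := by unfold Spec_score_design_py; infer_instance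

-- ===== CLAIM (what is proved, stated in full; the proofs are below) =====
def Claim_equal_score_design_py : Prop := ∀ (pub_types : List String) (merged : String), Dom_score_design_py pub_types merged → Spec_score_design_py pub_types merged (score_design_py pub_types merged)

-- ===== LEMMAS AND PROOFS =====

-- pvS t = B's table score of a (lowercased) tag; pvC = A's cascade as a function of its four condition bits.
def pvS (t : String) : Int := PySem.Dict.getD pvDesignScores t 8

def pvC (b1 b2 b3 b4 : Bool) : Int :=
  if b1 then 25 else if b2 then 22 else if b3 then 20 else if b4 then 15 else 8

theorem pvS_of_ne (t : String)
    (h1 : t ≠ "randomized controlled trial") (h2 : t ≠ "meta-analysis")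
    (h3 : t ≠ "systematic review") (h4 : t ≠ "clinical trial")
    (h5 : t ≠ "observational study") : pvS t = 8 := by
  have e : pvDesignScores
      = ((((PySem.Dict.empty.insert "randomized controlled trial" 25).insert "meta-analysis" 22).insert
            "systematic review" 22).insert "clinical trial" 20).insert "observational study" 15 := rfl
  rw [pvS, e]
  simp [PySem.Dict.getD_insert, h1, h2, h3, h4, h5]

-- a single tag's table score is A's cascade applied to the tag's own five key-equality bits
theorem pvS_eq (t : String) :
    pvS t = pvC (decide ("randomized controlled trial" = t))
                ((decide ("meta-analysis" = t)) || (decide ("systematic review" = t)))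
                (decide ("clinical trial" = t))
                (decide ("observational study" = t)) := by
  rcases eq_or_ne ("randomized controlled trial" : String) t with h1 | h1
  · subst h1; decide
  rcases eq_or_ne ("meta-analysis" : String) t with h2 | h2
  · subst h2; decide
  rcases eq_or_ne ("systematic review" : String) t with h3 | h3
  · subst h3; decide
  rcases eq_or_ne ("clinical trial" : String) t with h4 | h4
  · subst h4; decide
  rcases eq_or_ne ("observational study" : String) t with h5 | h5
  · subst h5; decide
  rw [pvS_of_ne t (Ne.symm h1) (Ne.symm h2) (Ne.symm h3) (Ne.symm h4) (Ne.symm h5),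
    decide_eq_false h1, decide_eq_false h2, decide_eq_false h3, decide_eq_false h4,
    decide_eq_false h5]
  rfl

-- max of two cascades is the cascade of the or'd condition bits
theorem pvstep (v : Int) (x1 x2 x3 x4 x5 b1 b2 b3 b4 b5 : Bool)
    (hv : v = pvC x1 (x2 || x3) x4 x5) :
    max v (pvC b1 (b2 || b3) b4 b5)
      = pvC (x1 || b1) ((x2 || b2) || (x3 || b3)) (x4 || b4) (x5 || b5) := by
  subst hv; revert x1 x2 x3 x4 x5 b1 b2 b3 b4 b5; decide

theorem pv_decide_or (p q : Prop) [Decidable p] [Decidable q] :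
    decide (p ∨ q) = (decide p || decide q) := by
  by_cases h : p
  · simp [h]
  · simp [h]

theorem pv_foldl_max_shift (l : List String) (a b : Int) :
    l.foldl (fun best p => max best (PySem.Dict.getD pvDesignScores (PySem.Str.lower p) 8)) (max a b)
      = max a (l.foldl (fun best p => max best (PySem.Dict.getD pvDesignScores (PySem.Str.lower p) 8)) b) := by
  induction l generalizing b with
  | nil => rfl
  | cons p l ih =>
    simpa [max_assoc] using ih (max b (PySem.Dict.getD pvDesignScores (PySem.Str.lower p) 8))

-- B's running max over the tag list equals A's cascade of the four membership bits
theorem pvM_eq (l : List String) :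
    l.foldl (fun best p => max best (PySem.Dict.getD pvDesignScores (PySem.Str.lower p) 8)) 8
      = pvC (decide ("randomized controlled trial" ∈ l.map PySem.Str.lower))
            ((decide ("meta-analysis" ∈ l.map PySem.Str.lower)) || (decide ("systematic review" ∈ l.map PySem.Str.lower)))
            (decide ("clinical trial" ∈ l.map PySem.Str.lower))
            (decide ("observational study" ∈ l.map PySem.Str.lower)) := by
  induction l with
  | nil => rfl
  | cons p l ih =>
    have step : (p :: l).foldl (fun best p => max best (PySem.Dict.getD pvDesignScores (PySem.Str.lower p) 8)) 8
        = max (PySem.Dict.getD pvDesignScores (PySem.Str.lower p) 8)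
            (l.foldl (fun best p => max best (PySem.Dict.getD pvDesignScores (PySem.Str.lower p) 8)) 8) := by
      simpa [max_comm] using pv_foldl_max_shift l (PySem.Dict.getD pvDesignScores (PySem.Str.lower p) 8) 8
    rw [step, ih]
    simp only [List.map_cons, List.mem_cons, pv_decide_or]
    exact pvstep _ _ _ _ _ _ _ _ _ _ _ (pvS_eq (PySem.Str.lower p))

theorem pvContains (xs : List String) (k : String) :
    PySem.Set.contains (PySem.Set.ofList xs) k = decide (k ∈ xs) := by
  simp [PySem.Set.contains_eq_listContains, List.contains_eq_mem, PySem.Set.mem_ofList]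

theorem pv_final (b1 b2 b3 b4 b5 coh : Bool) (M : Int)
    (hM : M = pvC b1 (b2 || b3) b4 b5) :
    (if b1 then (25:Int) else if b2 || b3 then 22 else if b4 then 20
     else if b5 || coh then 15 else 8)
      = (if coh then max M 15 else M) := by
  subst hM; revert b1 b2 b3 b4 b5 coh; decide

-- ===== VERDICT (by name: the statement is the Claim_ definition above) =====
theorem score_design_py_spec : Claim_equal_score_design_py := by
  intro pub_types merged _
  show (if PySem.Set.contains (PySem.Set.ofList (pub_types.map PySem.Str.lower)) "randomized controlled trial" then (25:Int)
    else if PySem.Set.contains (PySem.Set.ofList (pub_types.map PySem.Str.lower)) "meta-analysis"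
         || PySem.Set.contains (PySem.Set.ofList (pub_types.map PySem.Str.lower)) "systematic review" then 22
    else if PySem.Set.contains (PySem.Set.ofList (pub_types.map PySem.Str.lower)) "clinical trial" then 20
    else if PySem.Set.contains (PySem.Set.ofList (pub_types.map PySem.Str.lower)) "observational study"
         || PySem.Str.isIn "cohort" merged then 15
    else 8)
    = (if PySem.Str.isIn "cohort" merged
       then max (pub_types.foldl (fun best p => max best (PySem.Dict.getD pvDesignScores (PySem.Str.lower p) 8)) 8) 15
       else pub_types.foldl (fun best p => max best (PySem.Dict.getD pvDesignScores (PySem.Str.lower p) 8)) 8)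
  simp only [pvContains]
  exact pv_final _ _ _ _ _ _ _ (pvM_eq pub_types)
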